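-- pv_equiv track=rewrite | github.com/0x5chn0uf/SmartWalletFX | serena/infrastructure/search/engine.py | _infer_domain_from_context
-- ===== SOURCE A (Python) =====
-- from typing import Any, Dict, List, Optional
--
-- def _infer_domain_from_context(
--     current_task: Dict[str, Any], provided_domain: str
-- ) -> str:
--     """Infer the most appropriate domain from task context."""
--     if provided_domain and provided_domain != "general":
--         # Check if provided domain makes sense, otherwise infer
--         valid_domains = ["backend", "frontend", "security", "devops", "testing"]
--         if provided_domain in valid_domains:
--             return provided_domain
--
--     # Infer from task title and description
--     task_title = current_task.get("title", "").lower()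
--     task_desc = current_task.get("description", "").lower()
--     content = f"{task_title} {task_desc}"
--
--     # Backend indicators
--     if any(
--         term in content
--         for term in ["asgi", "fastapi", "sqlalchemy", "api", "database", "server"]
--     ):
--         return "backend"
--
--     # Frontend indicators
--     if any(
--         term in content
--         for term in ["react", "typescript", "ui", "component", "frontend"]
--     ):
--         return "frontend"
--
--     # Security indicators
--     if any(
--         term in content
--         for term in ["auth", "jwt", "security", "2fa", "oauth", "encryption"]
--     ):
--         return "security"
--
--     # DevOps indicators
--     if any(
--         term in content
--         for term in ["deploy", "docker", "ci", "pipeline", "infrastructure"]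
--     ):
--         return "devops"
--
--     # Testing indicators
--     if any(term in content for term in ["test", "pytest", "vitest", "e2e", "unit"]):
--         return "testing"
--
--     return provided_domain or "general"
-- ===== SOURCE B (Python) =====
-- _DOMAINS = ["backend", "frontend", "security", "devops", "testing"]
--
-- _KEYWORD_PRIORITY = [
--     ("asgi", 0), ("fastapi", 0), ("sqlalchemy", 0), ("api", 0), ("database", 0),
--     ("server", 0),
--     ("react", 1), ("typescript", 1), ("ui", 1), ("component", 1), ("frontend", 1),
--     ("auth", 2), ("jwt", 2), ("security", 2), ("2fa", 2), ("oauth", 2),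
--     ("encryption", 2),
--     ("deploy", 3), ("docker", 3), ("ci", 3), ("pipeline", 3), ("infrastructure", 3),
--     ("test", 4), ("pytest", 4), ("vitest", 4), ("e2e", 4), ("unit", 4),
-- ]
--
--
-- def _infer_domain_from_context(current_task, provided_domain):
--     """Infer the domain by one left-to-right scan of the text: at every position,
--     remember the best (lowest) priority of any keyword that starts there, instead
--     of running one separate substring search per keyword."""
--     if provided_domain in _DOMAINS:
--         return provided_domain
--     content = "{} {}".format(
--         current_task.get("title", ""), current_task.get("description", "")
--     ).lower()
--     best = len(_DOMAINS)
--     for i in range(len(content)):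
--         for kw, pri in _KEYWORD_PRIORITY:
--             if pri < best and content.startswith(kw, i):
--                 best = pri
--     return _DOMAINS[best] if best < len(_DOMAINS) else (provided_domain or "general")
-- ===== Notes on version B (the rewrite author's own statement) =====
-- stated objective: alternative
-- what changed: Instead of A's five staged branches each running its own substring search per keyword, B makes a single left-to-right scan of the combined text, checking at each position which keywords of a flat (keyword, priority) list start there and keeping the minimum priority seen; the result is the domain of that minimum (same priority order), with the same provided_domain guard and fallback.
import Mathlib
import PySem

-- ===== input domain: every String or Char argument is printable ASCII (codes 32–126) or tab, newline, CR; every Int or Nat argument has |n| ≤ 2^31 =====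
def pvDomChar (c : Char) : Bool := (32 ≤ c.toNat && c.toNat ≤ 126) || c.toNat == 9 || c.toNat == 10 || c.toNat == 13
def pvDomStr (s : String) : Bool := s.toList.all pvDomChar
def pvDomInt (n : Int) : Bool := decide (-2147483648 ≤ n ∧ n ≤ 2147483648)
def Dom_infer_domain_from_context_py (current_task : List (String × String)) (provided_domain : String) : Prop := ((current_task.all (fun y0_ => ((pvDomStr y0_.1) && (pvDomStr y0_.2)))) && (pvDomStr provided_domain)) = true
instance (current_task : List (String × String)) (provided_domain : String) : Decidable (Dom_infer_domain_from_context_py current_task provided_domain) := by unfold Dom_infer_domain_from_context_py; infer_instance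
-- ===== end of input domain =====

-- B replaces A's five staged per-keyword substring searches by ONE left-to-right scan of the
-- text that keeps the best (lowest) priority of any keyword starting at each position
-- (objective: alternative). Equivalence is proved on all inputs.

-- ===== PORT A =====
-- A's sequential branch chain; content is built as lower(title) ++ " " ++ lower(desc)
-- (strings handled as List Char via PySem.Chars, exact for Python str on this domain).
def infer_domain_from_context_py (current_task : List (String × String)) (provided_domain : String) : String :=
  if (provided_domain ≠ "" ∧ provided_domain ≠ "general") ∧
      provided_domain ∈ (["backend", "frontend", "security", "devops", "testing"] : List String) then
    provided_domain
  else
    let task_title := PySem.Chars.lower ((PySem.Dict.mk current_task).getD "title" "").toList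
    let task_desc := PySem.Chars.lower ((PySem.Dict.mk current_task).getD "description" "").toList
    let content := task_title ++ ' ' :: task_desc
    if (["asgi", "fastapi", "sqlalchemy", "api", "database", "server"] : List String).any
        (fun t => PySem.Chars.isIn t.toList content) then "backend"
    else if (["react", "typescript", "ui", "component", "frontend"] : List String).any
        (fun t => PySem.Chars.isIn t.toList content) then "frontend"
    else if (["auth", "jwt", "security", "2fa", "oauth", "encryption"] : List String).any
        (fun t => PySem.Chars.isIn t.toList content) then "security"
    else if (["deploy", "docker", "ci", "pipeline", "infrastructure"] : List String).any
        (fun t => PySem.Chars.isIn t.toList content) then "devops"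
    else if (["test", "pytest", "vitest", "e2e", "unit"] : List String).any
        (fun t => PySem.Chars.isIn t.toList content) then "testing"
    else if provided_domain = "" then "general" else provided_domain

-- ===== PORT B =====
-- Source B's flat (keyword, priority) list, in the same order.
def kwPriorities : List (String × Nat) :=
  [("asgi", 0), ("fastapi", 0), ("sqlalchemy", 0), ("api", 0), ("database", 0),
   ("server", 0),
   ("react", 1), ("typescript", 1), ("ui", 1), ("component", 1), ("frontend", 1),
   ("auth", 2), ("jwt", 2), ("security", 2), ("2fa", 2), ("oauth", 2),
   ("encryption", 2),
   ("deploy", 3), ("docker", 3), ("ci", 3), ("pipeline", 3), ("infrastructure", 3),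
   ("test", 4), ("pytest", 4), ("vitest", 4), ("e2e", 4), ("unit", 4)]

-- Source B: one pass over the positions of content; the inner loop lowers `best` to any keyword
-- priority that improves it and whose keyword starts at this position.
-- content.startswith(kw, i) with 0 ≤ i ≤ len(content) is ported by hand (exactly) as
-- PySem.Chars.startswith (content.drop i) kw; range(len(content)) is List.range.
def infer_domain_from_context_py_alt (current_task : List (String × String)) (provided_domain : String) : String :=
  if provided_domain ∈ (["backend", "frontend", "security", "devops", "testing"] : List String) then
    provided_domain
  else
    let content := PySem.Chars.lower
      (((PySem.Dict.mk current_task).getD "title" "").toList ++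
        ' ' :: ((PySem.Dict.mk current_task).getD "description" "").toList)
    let best := (List.range content.length).foldl
      (fun best i => kwPriorities.foldl
        (fun b p => if p.2 < b ∧ PySem.Chars.startswith (content.drop i) p.1.toList = true then p.2 else b)
        best) 5
    if best < 5 then
      (["backend", "frontend", "security", "devops", "testing"] : List String).getD best ""
    else if provided_domain = "" then "general" else provided_domain

-- ===== PRECONDITION & SPEC =====
def Spec_infer_domain_from_context_py (current_task : List (String × String)) (provided_domain : String) (out : String) : Prop := out = infer_domain_from_context_py_alt current_task provided_domain
instance (current_task : List (String × String)) (provided_domain : String) (out : String) : Decidable (Spec_infer_domain_from_context_py current_task provided_domain out) := by unfold Spec_infer_domain_from_context_py; infer_instance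

-- ===== CLAIM (what is proved, stated in full; the proofs are below) =====
def Claim_equal_infer_domain_from_context_py : Prop := ∀ (current_task : List (String × String)) (provided_domain : String), Dom_infer_domain_from_context_py current_task provided_domain → Spec_infer_domain_from_context_py current_task provided_domain (infer_domain_from_context_py current_task provided_domain)

-- ===== LEMMAS AND PROOFS =====

-- lower distributes over the f-string concatenation "title desc" (lower is charwise, ' ' is fixed)
theorem pv_lower_append (t d : List Char) :
    PySem.Chars.lower (t ++ ' ' :: d) = PySem.Chars.lower t ++ ' ' :: PySem.Chars.lower d := by
  simp [PySem.Chars.lower, (by decide : PySem.Chars.lowerChar ' ' = ' ')]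

-- the priorities of all keywords starting at some scanned position of content
def pvHits (content : List Char) : List Nat :=
  (List.range content.length).flatMap (fun i =>
    (kwPriorities.filter (fun p => PySem.Chars.startswith (content.drop i) p.1.toList)).map (·.2))

-- B's inner loop is a fold of `min` over the priorities of the keywords hitting this position
theorem pv_inner_eq (s : List Char) (l : List (String × Nat)) (best : Nat) :
    l.foldl (fun b p => if p.2 < b ∧ PySem.Chars.startswith s p.1.toList = true then p.2 else b) best
      = List.foldl min best ((l.filter (fun p => PySem.Chars.startswith s p.1.toList)).map (·.2)) := by
  induction l generalizing best with
  | nil => rfl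
  | cons p l ih =>
    simp only [List.foldl, List.filter]
    cases h : PySem.Chars.startswith s p.1.toList with
    | true =>
      simp only [List.map, List.foldl]
      rw [ih]
      congr 1
      by_cases hlt : p.2 < best
      · rw [if_pos ⟨hlt, by trivial⟩]; omega
      · rw [if_neg (fun hc => hlt hc.1)]; omega
    | false =>
      rw [if_neg (by simp), ih]

theorem pv_foldl_congr {α β : Type} (l : List α) (f g : β → α → β) (a : β)
    (h : ∀ b x, f b x = g b x) : l.foldl f a = l.foldl g a := by
  induction l generalizing a with
  | nil => rfl
  | cons x l ih => simp only [List.foldl, h]; exact ih _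

-- B's double loop computes foldl min 5 over pvHits
theorem pv_best_eq_foldl_min (content : List Char) :
    (List.range content.length).foldl
      (fun best i => kwPriorities.foldl
        (fun b p => if p.2 < b ∧ PySem.Chars.startswith (content.drop i) p.1.toList = true then p.2 else b)
        best) 5
      = List.foldl min 5 (pvHits content) := by
  rw [pvHits, List.foldl_flatMap]
  exact pv_foldl_congr _ _ _ _ (fun b i => pv_inner_eq (content.drop i) kwPriorities b)

theorem pv_foldl_min_le_init (l : List Nat) (a : Nat) : List.foldl min a l ≤ a := by
  induction l generalizing a with
  | nil => simp
  | cons x l ih => exact le_trans (ih (min a x)) (by omega)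

theorem pv_foldl_min_le_mem (l : List Nat) (a x : Nat) (hx : x ∈ l) : List.foldl min a l ≤ x := by
  induction l generalizing a with
  | nil => cases hx
  | cons y l ih =>
    simp only [List.foldl]
    rcases List.mem_cons.mp hx with rfl | h
    · exact le_trans (pv_foldl_min_le_init l (min a x)) (min_le_right a x)
    · exact ih (min a y) h

theorem pv_foldl_min_mem_or_init (l : List Nat) (a : Nat) :
    List.foldl min a l = a ∨ List.foldl min a l ∈ l := by
  induction l generalizing a with
  | nil => left; rfl
  | cons x l ih =>
    simp only [List.foldl]
    rcases ih (min a x) with h | h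
    · by_cases hax : a ≤ x
      · left; rw [h, min_eq_left hax]
      · right; rw [h, min_eq_right (by omega : x ≤ a)]; exact List.mem_cons_self
    · right; exact List.mem_cons_of_mem _ h

-- every keyword of the table is nonempty
theorem pv_kw_ne_nil : ∀ p ∈ kwPriorities, p.1.toList ≠ [] := by decide

-- a scanned starting position exists iff the keyword occurs as a substring (keyword nonempty)
theorem pv_pos_iff_isIn (kw content : List Char) (hkw : kw ≠ []) :
    (∃ i ∈ List.range content.length, PySem.Chars.startswith (content.drop i) kw = true)
      ↔ PySem.Chars.isIn kw content = true := by
  constructor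
  · rintro ⟨i, _, h⟩
    exact (PySem.Chars.exists_prefix_drop_iff_isIn kw content).mp
      ⟨i, (PySem.Chars.startswith_iff _ _).mp h⟩
  · intro h
    obtain ⟨j, hj⟩ := (PySem.Chars.exists_prefix_drop_iff_isIn kw content).mpr h
    refine ⟨j, List.mem_range.mpr ?_, (PySem.Chars.startswith_iff _ _).mpr hj⟩
    by_contra hge
    rw [List.drop_eq_nil_of_le (by omega)] at hj
    exact hkw (List.prefix_nil.mp hj)

theorem pv_mem_hits_iff (content : List Char) (d : Nat) :
    d ∈ pvHits content ↔
      ∃ p ∈ kwPriorities, p.2 = d ∧ PySem.Chars.isIn p.1.toList content = true := by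
  constructor
  · intro h
    simp only [pvHits, List.mem_flatMap, List.mem_map, List.mem_filter] at h
    obtain ⟨i, hi, p, ⟨hp, hs⟩, hd⟩ := h
    exact ⟨p, hp, hd, (pv_pos_iff_isIn p.1.toList content (pv_kw_ne_nil p hp)).mp ⟨i, hi, hs⟩⟩
  · rintro ⟨p, hp, hd, hin⟩
    obtain ⟨i, hi, hs⟩ := (pv_pos_iff_isIn p.1.toList content (pv_kw_ne_nil p hp)).mpr hin
    simp only [pvHits, List.mem_flatMap, List.mem_map, List.mem_filter]
    exact ⟨i, hi, p, ⟨hp, hs⟩, hd⟩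

-- a hit priority is one of 0..4 and witnesses the corresponding any-condition of A
theorem pv_hit_implies (content : List Char) (m : Nat) (hm : m ∈ pvHits content) :
    (m = 0 ∧ (["asgi", "fastapi", "sqlalchemy", "api", "database", "server"] : List String).any (fun t => PySem.Chars.isIn t.toList content) = true) ∨
    (m = 1 ∧ (["react", "typescript", "ui", "component", "frontend"] : List String).any (fun t => PySem.Chars.isIn t.toList content) = true) ∨
    (m = 2 ∧ (["auth", "jwt", "security", "2fa", "oauth", "encryption"] : List String).any (fun t => PySem.Chars.isIn t.toList content) = true) ∨
    (m = 3 ∧ (["deploy", "docker", "ci", "pipeline", "infrastructure"] : List String).any (fun t => PySem.Chars.isIn t.toList content) = true) ∨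
    (m = 4 ∧ (["test", "pytest", "vitest", "e2e", "unit"] : List String).any (fun t => PySem.Chars.isIn t.toList content) = true) := by
  obtain ⟨p, hp, hd, hin⟩ := (pv_mem_hits_iff content m).mp hm
  simp only [kwPriorities, List.mem_cons, List.not_mem_nil, or_false] at hp
  rcases hp with rfl|rfl|rfl|rfl|rfl|rfl|rfl|rfl|rfl|rfl|rfl|rfl|rfl|rfl|rfl|rfl|rfl|rfl|rfl|rfl|rfl|rfl|rfl|rfl|rfl|rfl|rfl <;>
    simp_all

theorem pv_mem0 (content : List Char)
    (h : (["asgi", "fastapi", "sqlalchemy", "api", "database", "server"] : List String).any (fun t => PySem.Chars.isIn t.toList content) = true) :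
    0 ∈ pvHits content := by
  rw [pv_mem_hits_iff]
  obtain ⟨t, ht, hin⟩ := List.any_eq_true.mp h
  fin_cases ht <;> exact ⟨(_, 0), by decide, rfl, hin⟩

theorem pv_mem1 (content : List Char)
    (h : (["react", "typescript", "ui", "component", "frontend"] : List String).any (fun t => PySem.Chars.isIn t.toList content) = true) :
    1 ∈ pvHits content := by
  rw [pv_mem_hits_iff]
  obtain ⟨t, ht, hin⟩ := List.any_eq_true.mp h
  fin_cases ht <;> exact ⟨(_, 1), by decide, rfl, hin⟩

theorem pv_mem2 (content : List Char)
    (h : (["auth", "jwt", "security", "2fa", "oauth", "encryption"] : List String).any (fun t => PySem.Chars.isIn t.toList content) = true) :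
    2 ∈ pvHits content := by
  rw [pv_mem_hits_iff]
  obtain ⟨t, ht, hin⟩ := List.any_eq_true.mp h
  fin_cases ht <;> exact ⟨(_, 2), by decide, rfl, hin⟩

theorem pv_mem3 (content : List Char)
    (h : (["deploy", "docker", "ci", "pipeline", "infrastructure"] : List String).any (fun t => PySem.Chars.isIn t.toList content) = true) :
    3 ∈ pvHits content := by
  rw [pv_mem_hits_iff]
  obtain ⟨t, ht, hin⟩ := List.any_eq_true.mp h
  fin_cases ht <;> exact ⟨(_, 3), by decide, rfl, hin⟩

theorem pv_mem4 (content : List Char)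
    (h : (["test", "pytest", "vitest", "e2e", "unit"] : List String).any (fun t => PySem.Chars.isIn t.toList content) = true) :
    4 ∈ pvHits content := by
  rw [pv_mem_hits_iff]
  obtain ⟨t, ht, hin⟩ := List.any_eq_true.mp h
  fin_cases ht <;> exact ⟨(_, 4), by decide, rfl, hin⟩

-- the scan's final best equals the first satisfied branch of A's chain
theorem pv_best_val (content : List Char) :
    List.foldl min 5 (pvHits content) =
      (if (["asgi", "fastapi", "sqlalchemy", "api", "database", "server"] : List String).any (fun t => PySem.Chars.isIn t.toList content) = true then 0
       else if (["react", "typescript", "ui", "component", "frontend"] : List String).any (fun t => PySem.Chars.isIn t.toList content) = true then 1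
       else if (["auth", "jwt", "security", "2fa", "oauth", "encryption"] : List String).any (fun t => PySem.Chars.isIn t.toList content) = true then 2
       else if (["deploy", "docker", "ci", "pipeline", "infrastructure"] : List String).any (fun t => PySem.Chars.isIn t.toList content) = true then 3
       else if (["test", "pytest", "vitest", "e2e", "unit"] : List String).any (fun t => PySem.Chars.isIn t.toList content) = true then 4
       else 5) := by
  by_cases h0 : (["asgi", "fastapi", "sqlalchemy", "api", "database", "server"] : List String).any (fun t => PySem.Chars.isIn t.toList content) = true
  · rw [if_pos h0]
    have hle := pv_foldl_min_le_mem _ 5 0 (pv_mem0 content h0)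
    omega
  rw [if_neg h0]
  by_cases h1 : (["react", "typescript", "ui", "component", "frontend"] : List String).any (fun t => PySem.Chars.isIn t.toList content) = true
  · rw [if_pos h1]
    have hle := pv_foldl_min_le_mem _ 5 1 (pv_mem1 content h1)
    rcases pv_foldl_min_mem_or_init (pvHits content) 5 with h | h
    · omega
    · rcases pv_hit_implies content _ h with ⟨_,hq⟩|⟨he,_⟩|⟨he,_⟩|⟨he,_⟩|⟨he,_⟩ <;>
        first | exact absurd hq h0 | omega
  rw [if_neg h1]
  by_cases h2 : (["auth", "jwt", "security", "2fa", "oauth", "encryption"] : List String).any (fun t => PySem.Chars.isIn t.toList content) = true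
  · rw [if_pos h2]
    have hle := pv_foldl_min_le_mem _ 5 2 (pv_mem2 content h2)
    rcases pv_foldl_min_mem_or_init (pvHits content) 5 with h | h
    · omega
    · rcases pv_hit_implies content _ h with ⟨_,hq⟩|⟨_,hq⟩|⟨he,_⟩|⟨he,_⟩|⟨he,_⟩ <;>
        first | exact absurd hq h0 | exact absurd hq h1 | omega
  rw [if_neg h2]
  by_cases h3 : (["deploy", "docker", "ci", "pipeline", "infrastructure"] : List String).any (fun t => PySem.Chars.isIn t.toList content) = true
  · rw [if_pos h3]
    have hle := pv_foldl_min_le_mem _ 5 3 (pv_mem3 content h3)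
    rcases pv_foldl_min_mem_or_init (pvHits content) 5 with h | h
    · omega
    · rcases pv_hit_implies content _ h with ⟨_,hq⟩|⟨_,hq⟩|⟨_,hq⟩|⟨he,_⟩|⟨he,_⟩ <;>
        first | exact absurd hq h0 | exact absurd hq h1 | exact absurd hq h2 | omega
  rw [if_neg h3]
  by_cases h4 : (["test", "pytest", "vitest", "e2e", "unit"] : List String).any (fun t => PySem.Chars.isIn t.toList content) = true
  · rw [if_pos h4]
    have hle := pv_foldl_min_le_mem _ 5 4 (pv_mem4 content h4)
    rcases pv_foldl_min_mem_or_init (pvHits content) 5 with h | h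
    · omega
    · rcases pv_hit_implies content _ h with ⟨_,hq⟩|⟨_,hq⟩|⟨_,hq⟩|⟨_,hq⟩|⟨he,_⟩ <;>
        first | exact absurd hq h0 | exact absurd hq h1 | exact absurd hq h2 | exact absurd hq h3 | omega
  rw [if_neg h4]
  rcases pv_foldl_min_mem_or_init (pvHits content) 5 with h | h
  · exact h
  · rcases pv_hit_implies content _ h with ⟨_,hq⟩|⟨_,hq⟩|⟨_,hq⟩|⟨_,hq⟩|⟨_,hq⟩ <;>
      first | exact absurd hq h0 | exact absurd hq h1 | exact absurd hq h2 | exact absurd hq h3 | exact absurd hq h4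

-- ===== VERDICT (by name: the statement is the Claim_ definition above) =====
theorem infer_domain_from_context_py_spec : Claim_equal_infer_domain_from_context_py := by
  intro current_task provided_domain _
  unfold Spec_infer_domain_from_context_py infer_domain_from_context_py infer_domain_from_context_py_alt
  by_cases h : provided_domain ∈ (["backend", "frontend", "security", "devops", "testing"] : List String)
  · have hm := h
    simp only [List.mem_cons, List.not_mem_nil, or_false] at hm
    have hne : provided_domain ≠ "" ∧ provided_domain ≠ "general" := by
      rcases hm with rfl | rfl | rfl | rfl | rfl <;> exact ⟨by decide, by decide⟩
    rw [if_pos ⟨hne, h⟩, if_pos h]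
  · rw [if_neg (fun hc => h hc.2), if_neg h]
    simp only [pv_lower_append]
    generalize (PySem.Chars.lower ((PySem.Dict.mk current_task).getD "title" "").toList ++
        ' ' :: PySem.Chars.lower ((PySem.Dict.mk current_task).getD "description" "").toList) = content
    rw [pv_best_eq_foldl_min, pv_best_val]
    by_cases h0 : (["asgi", "fastapi", "sqlalchemy", "api", "database", "server"] : List String).any (fun t => PySem.Chars.isIn t.toList content) = true
    · simp [h0]
    by_cases h1 : (["react", "typescript", "ui", "component", "frontend"] : List String).any (fun t => PySem.Chars.isIn t.toList content) = true
    · simp [h0, h1]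
    by_cases h2 : (["auth", "jwt", "security", "2fa", "oauth", "encryption"] : List String).any (fun t => PySem.Chars.isIn t.toList content) = true
    · simp [h0, h1, h2]
    by_cases h3 : (["deploy", "docker", "ci", "pipeline", "infrastructure"] : List String).any (fun t => PySem.Chars.isIn t.toList content) = true
    · simp [h0, h1, h2, h3]
    by_cases h4 : (["test", "pytest", "vitest", "e2e", "unit"] : List String).any (fun t => PySem.Chars.isIn t.toList content) = true
    · simp [h0, h1, h2, h3, h4]
    · simp [h0, h1, h2, h3, h4]
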